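-- pv_equiv track=rewrite | github.com/Ron-Caster/Jop-Pilot | search/job_search.py | _filter_jobs_by_terms
-- ===== SOURCE A (Python) =====
-- def _filter_jobs_by_terms(
--     jobs: list[dict[str, str]],
--     terms: list[str],
-- ) -> list[dict[str, str]]:
--     normalized_terms = [t.strip().lower() for t in terms if t.strip()]
--     if not normalized_terms:
--         return []
--
--     results: list[dict[str, str]] = []
--     for job in jobs:
--         text = (job.get("text", "") or "").lower()
--         if any(term in text for term in normalized_terms):
--             results.append(job)
--
--     return results
-- ===== SOURCE B (Python) =====
-- def _filter_jobs_by_terms(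
--     jobs: list[dict[str, str]],
--     terms: list[str],
-- ) -> list[dict[str, str]]:
--     # Term-outer scan: build the set of matched job indices, one pass per term,
--     # skipping jobs already matched; then emit the jobs by index in order.
--     texts = [(job.get("text", "")).lower() for job in jobs]
--     matched: set[int] = set()
--     for raw in terms:
--         term = raw.strip().lower()
--         if not term:
--             continue
--         for i, text in enumerate(texts):
--             if i not in matched and term in text:
--                 matched.add(i)
--     return [job for i, job in enumerate(jobs) if i in matched]
-- ===== Notes on version B (the rewrite author's own statement) =====
-- stated objective: alternative
-- what changed: Replaces A's job-outer loop (testing every job against every normalized term) with a term-outer scan that builds the set of matched job indices, skipping already-matched jobs, and then emits the jobs by index in order.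
import Mathlib
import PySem

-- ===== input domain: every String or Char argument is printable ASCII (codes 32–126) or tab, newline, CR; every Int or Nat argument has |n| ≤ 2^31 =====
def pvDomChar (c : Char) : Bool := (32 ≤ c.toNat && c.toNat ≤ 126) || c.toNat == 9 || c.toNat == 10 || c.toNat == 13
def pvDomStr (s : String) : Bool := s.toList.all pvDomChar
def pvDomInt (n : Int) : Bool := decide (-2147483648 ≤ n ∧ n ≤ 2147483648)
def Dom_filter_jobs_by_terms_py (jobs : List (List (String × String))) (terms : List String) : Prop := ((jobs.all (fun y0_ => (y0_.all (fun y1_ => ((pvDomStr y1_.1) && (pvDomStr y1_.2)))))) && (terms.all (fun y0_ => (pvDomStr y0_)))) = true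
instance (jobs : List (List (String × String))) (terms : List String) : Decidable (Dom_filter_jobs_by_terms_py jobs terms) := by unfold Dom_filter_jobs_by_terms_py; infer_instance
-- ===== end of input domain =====

-- B replaces A's job-outer loop (each job tested against every term) by a term-outer scan that
-- collects the set of matched job indices, skipping already-matched jobs, then emits the jobs by
-- index in order — an alternative traversal of the same cost, proved to return A's exact list.

-- ===== PORT A =====
def filter_jobs_by_terms_py (jobs : List (List (String × String))) (terms : List String) : List (List (String × String)) :=
  let normalized_terms :=
    terms.foldl (fun acc t =>
      if PySem.Str.strip t ≠ "" then acc ++ [PySem.Str.lower (PySem.Str.strip t)] else acc) []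
  if normalized_terms = [] then []
  else
    jobs.foldl (fun results job =>
      let g := PySem.Dict.getD (PySem.Dict.mk job) "text" ""
      let text := PySem.Str.lower (if g = "" then "" else g)   -- 'job.get("text", "") or ""'
      if normalized_terms.any (fun term => PySem.Str.isIn term text) then results ++ [job]
      else results) []

-- ===== PORT B =====
def filter_jobs_by_terms_py_alt (jobs : List (List (String × String))) (terms : List String) : List (List (String × String)) :=
  let texts := jobs.map (fun job => PySem.Str.lower (PySem.Dict.getD (PySem.Dict.mk job) "text" ""))
  let matched : PySem.Set Int :=
    terms.foldl (fun matched raw =>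
      let term := PySem.Str.lower (PySem.Str.strip raw)
      if term = "" then matched
      else
        (PySem.List.enumerate texts 0).foldl (fun m p =>
          if !(PySem.Set.contains m p.1) && PySem.Str.isIn term p.2 then PySem.Set.add m p.1
          else m) matched)
      PySem.Set.empty
  ((PySem.List.enumerate jobs 0).filter (fun p => PySem.Set.contains matched p.1)).map (fun p => p.2)

-- ===== PRECONDITION & SPEC =====
def Spec_filter_jobs_by_terms_py (jobs : List (List (String × String))) (terms : List String) (out : List (List (String × String))) : Prop := out = filter_jobs_by_terms_py_alt jobs terms
instance (jobs : List (List (String × String))) (terms : List String) (out : List (List (String × String))) : Decidable (Spec_filter_jobs_by_terms_py jobs terms out) := by unfold Spec_filter_jobs_by_terms_py; infer_instance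

-- ===== CLAIM (what is proved, stated in full; the proofs are below) =====
def Claim_equal_filter_jobs_by_terms_py : Prop := ∀ (jobs : List (List (String × String))) (terms : List String), Dom_filter_jobs_by_terms_py jobs terms → Spec_filter_jobs_by_terms_py jobs terms (filter_jobs_by_terms_py jobs terms)

-- ===== LEMMAS AND PROOFS =====

-- the lowered "text" field of a job, shared by both characterizations
def pvTextOf (job : List (String × String)) : String :=
  PySem.Str.lower (PySem.Dict.getD (PySem.Dict.mk job) "text" "")

-- whether some non-blank term (stripped+lowered) occurs in a given lowered text
def pvKeep (terms : List String) (text : String) : Bool :=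
  terms.any (fun raw => decide (PySem.Str.strip raw ≠ "") && PySem.Str.isIn (PySem.Str.lower (PySem.Str.strip raw)) text)

lemma pvKeep_iff (terms : List String) (text : String) :
    pvKeep terms text = true ↔
      ∃ raw ∈ terms, PySem.Str.strip raw ≠ "" ∧ PySem.Str.isIn (PySem.Str.lower (PySem.Str.strip raw)) text = true := by
  simp [pvKeep, List.any_eq_true]

lemma pv_or_empty (g : String) : (if g = "" then "" else g) = g := by
  by_cases h : g = "" <;> simp [h]

lemma pv_lower_eq_empty (s : String) : PySem.Str.lower s = "" ↔ s = "" := by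
  constructor
  · intro h
    have h2 := congrArg String.toList h
    simp [pysem, PySem.Chars.lower] at h2
    exact h2
  · intro h; subst h; rfl

-- membership in the inner fold of B (one term scanned over the indexed texts)
lemma pv_inner_mem (term : String) (l : List (Int × String)) (m : PySem.Set Int) (j : Int) :
    j ∈ l.foldl (fun m p =>
        if !(PySem.Set.contains m p.1) && PySem.Str.isIn term p.2 then PySem.Set.add m p.1
        else m) m
      ↔ j ∈ m ∨ ∃ p ∈ l, p.1 = j ∧ PySem.Str.isIn term p.2 = true := by
  induction l generalizing m with
  | nil => simp
  | cons p l ih =>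
    simp only [List.foldl_cons]
    by_cases h : (!(PySem.Set.contains m p.1) && PySem.Str.isIn term p.2) = true
    · rw [if_pos h, ih]
      simp only [Bool.and_eq_true, Bool.not_eq_true'] at h
      simp only [PySem.Set.mem_add, List.mem_cons]
      constructor
      · rintro (⟨hm | he⟩ | ⟨q, hq, rest⟩)
        · exact Or.inl hm
        · exact Or.inr ⟨p, Or.inl rfl, he.symm, h.2⟩
        · exact Or.inr ⟨q, Or.inr hq, rest⟩
      · rintro (hm | ⟨q, (rfl | hq), heq, hin⟩)
        · exact Or.inl (Or.inl hm)
        · exact Or.inl (Or.inr heq.symm)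
        · exact Or.inr ⟨q, hq, heq, hin⟩
    · rw [if_neg h, ih]
      simp only [Bool.and_eq_true, Bool.not_eq_true', not_and_or, Bool.not_eq_true,
        Bool.not_eq_false] at h
      simp only [List.mem_cons]
      constructor
      · rintro (hm | ⟨q, hq, rest⟩)
        · exact Or.inl hm
        · exact Or.inr ⟨q, Or.inr hq, rest⟩
      · rintro (hm | ⟨q, (rfl | hq), heq, hin⟩)
        · exact Or.inl hm
        · rcases h with hc | hf
          · subst heq; simp [pysem] at hc; exact Or.inl hc
          · rw [hf] at hin; cases hin
        · exact Or.inr ⟨q, hq, heq, hin⟩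

-- membership in B's matched set
lemma pv_outer_mem (texts : List String) (terms : List String) (m : PySem.Set Int) (j : Int) :
    j ∈ terms.foldl (fun matched raw =>
        let term := PySem.Str.lower (PySem.Str.strip raw)
        if term = "" then matched
        else
          (PySem.List.enumerate texts 0).foldl (fun m p =>
            if !(PySem.Set.contains m p.1) && PySem.Str.isIn term p.2 then PySem.Set.add m p.1
            else m) matched) m
      ↔ j ∈ m ∨ ∃ raw ∈ terms, PySem.Str.strip raw ≠ "" ∧
          ∃ p ∈ PySem.List.enumerate texts 0, p.1 = j ∧
            PySem.Str.isIn (PySem.Str.lower (PySem.Str.strip raw)) p.2 = true := by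
  induction terms generalizing m with
  | nil => simp
  | cons raw terms ih =>
    simp only [List.foldl_cons]
    by_cases h : PySem.Str.lower (PySem.Str.strip raw) = ""
    · simp only [h, ih]
      have hs : PySem.Str.strip raw = "" := (pv_lower_eq_empty _).mp h
      simp only [List.mem_cons]
      constructor
      · rintro (hm | ⟨q, hq, rest⟩)
        · exact Or.inl hm
        · exact Or.inr ⟨q, Or.inr hq, rest⟩
      · rintro (hm | ⟨q, (rfl | hq), hne, rest⟩)
        · exact Or.inl hm
        · exact absurd hs hne
        · exact Or.inr ⟨q, hq, hne, rest⟩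
    · rw [if_neg h]
      rw [ih, pv_inner_mem]
      have hs : PySem.Str.strip raw ≠ "" := fun hc => h ((pv_lower_eq_empty _).mpr hc)
      simp only [List.mem_cons]
      constructor
      · rintro (⟨hm | ⟨p, hp, rest⟩⟩ | ⟨q, hq, rest⟩)
        · exact Or.inl hm
        · exact Or.inr ⟨raw, Or.inl rfl, hs, p, hp, rest⟩
        · exact Or.inr ⟨q, Or.inr hq, rest⟩
      · rintro (hm | ⟨q, (rfl | hq), hne, rest⟩)
        · exact Or.inl (Or.inl hm)
        · exact Or.inl (Or.inr rest)
        · exact Or.inr ⟨q, hq, hne, rest⟩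

-- emitting by index set = filtering by the per-element predicate
lemma pv_final_filter {α : Type} (jobs : List α) (s : Int) (q : Int → Bool) (keep : α → Bool)
    (h : ∀ (k : Nat), (hk : k < jobs.length) → q (s + (k : Int)) = keep jobs[k]) :
    ((PySem.List.enumerate jobs s).filter (fun p => q p.1)).map (fun p => p.2) = jobs.filter keep := by
  induction jobs generalizing s with
  | nil => simp [PySem.List.enumerate_nil]
  | cons x xs ih =>
    rw [PySem.List.enumerate_cons]
    have h0 : q s = keep x := by simpa using h 0 (by simp)
    have hrec := ih (s + 1) (fun k hk => by
      have := h (k + 1) (by simpa using Nat.succ_lt_succ hk)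
      rw [show s + ((k + 1 : Nat) : Int) = s + 1 + (k : Int) by push_cast; ring] at this
      simpa using this)
    by_cases hq : keep x = true
    · simp [h0, hq, hrec]
    · simp only [Bool.not_eq_true] at hq
      simp [h0, hq, hrec]

lemma pv_norm_eq (terms : List String) :
    terms.foldl (fun acc t =>
      if PySem.Str.strip t ≠ "" then acc ++ [PySem.Str.lower (PySem.Str.strip t)] else acc) [] =
    (terms.filter (fun t => decide (PySem.Str.strip t ≠ ""))).map (fun t => PySem.Str.lower (PySem.Str.strip t)) := by
  rw [PySem.List.foldl_append_ite]
  simp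

lemma pv_any_eq (terms : List String) (text : String) :
    ((terms.filter (fun t => decide (PySem.Str.strip t ≠ ""))).map (fun t => PySem.Str.lower (PySem.Str.strip t))).any
      (fun term => PySem.Str.isIn term text) = pvKeep terms text := by
  rcases Bool.eq_false_or_eq_true (pvKeep terms text) with h | h <;> rw [h]
  · rw [List.any_eq_true]
    rw [pvKeep_iff] at h
    obtain ⟨raw, hr, hne, hin⟩ := h
    exact ⟨_, List.mem_map.mpr ⟨raw, List.mem_filter.mpr ⟨hr, by simpa using hne⟩, rfl⟩, hin⟩
  · rw [List.any_eq_false]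
    intro t ht
    simp only [List.mem_map, List.mem_filter, decide_eq_true_eq] at ht
    obtain ⟨raw, ⟨hr, hne⟩, rfl⟩ := ht
    rw [← Bool.not_eq_true, pvKeep_iff] at h
    simp only [Bool.not_eq_true]
    by_contra hc
    exact h ⟨raw, hr, hne, by simpa using hc⟩

-- A's loop is a filter by pvKeep
lemma pv_A_eq_filter (jobs : List (List (String × String))) (terms : List String) :
    filter_jobs_by_terms_py jobs terms = jobs.filter (fun job => pvKeep terms (pvTextOf job)) := by
  unfold filter_jobs_by_terms_py
  simp only [pv_norm_eq, pv_or_empty]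
  by_cases hn : (terms.filter (fun t => decide (PySem.Str.strip t ≠ ""))).map (fun t => PySem.Str.lower (PySem.Str.strip t)) = []
  · rw [if_pos hn]
    rw [List.map_eq_nil_iff, List.filter_eq_nil_iff] at hn
    symm
    rw [List.filter_eq_nil_iff]
    intro job _
    rw [pvKeep_iff]
    rintro ⟨raw, hr, hne, -⟩
    exact absurd (by simpa using hn raw hr) hne
  · rw [if_neg hn]
    have := PySem.List.foldl_append_if
      (p := fun (job : List (String × String)) =>
        ((terms.filter (fun t => decide (PySem.Str.strip t ≠ ""))).map (fun t => PySem.Str.lower (PySem.Str.strip t))).any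
          (fun term => PySem.Str.isIn term (pvTextOf job)))
      (f := fun (job : List (String × String)) => job) (l := jobs) (acc := [])
    simp only [pvTextOf] at this
    refine this.trans ?_
    simp only [List.nil_append, List.map_id']
    apply List.filter_congr
    intro job _
    rw [pv_any_eq]
    rfl

-- B's loop is the same filter
lemma pv_B_eq_filter (jobs : List (List (String × String))) (terms : List String) :
    filter_jobs_by_terms_py_alt jobs terms = jobs.filter (fun job => pvKeep terms (pvTextOf job)) := by
  unfold filter_jobs_by_terms_py_alt
  simp only [show (fun job => PySem.Str.lower (PySem.Dict.getD (PySem.Dict.mk job) "text" "")) = pvTextOf from rfl]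
  apply pv_final_filter
  intro k hk
  rw [Bool.eq_iff_iff, pvKeep_iff]
  rw [PySem.Set.contains_iff]
  rw [pv_outer_mem]
  simp only [PySem.Set.empty, List.not_mem_nil, false_or]
  constructor
  · rintro ⟨raw, hr, hne, p, hp, hpk, hin⟩
    rw [PySem.List.mem_enumerate_iff] at hp
    obtain ⟨k', hk', rfl⟩ := hp
    simp only at hpk hin
    have hkk : k' = k := by exact_mod_cast (by omega : (k' : Int) = (k : Int))
    subst hkk
    exact ⟨raw, hr, hne, by simpa using hin⟩
  · rintro ⟨raw, hr, hne, hin⟩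
    refine ⟨raw, hr, hne, ((0 : Int) + (k : Int), (jobs.map pvTextOf)[k]'(by simpa using hk)), ?_, rfl, ?_⟩
    · rw [PySem.List.mem_enumerate_iff]
      exact ⟨k, by simpa using hk, rfl⟩
    · simpa using hin

-- ===== VERDICT (by name: the statement is the Claim_ definition above) =====
theorem filter_jobs_by_terms_py_spec : Claim_equal_filter_jobs_by_terms_py := by
  intro jobs terms _
  unfold Spec_filter_jobs_by_terms_py
  rw [pv_A_eq_filter, pv_B_eq_filter]
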